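-- pv_equiv track=rewrite | github.com/varunjain3/BioProject | g4hunter/final.py | calculate_g4hunter_score
-- ===== SOURCE A (Python) =====
-- def calculate_g4hunter_score(seq):
--
--     window_size = len(seq)
--     count = 0
--     j = 0
--     temp = []
--
--     while j < (window_size):
--         e = seq[j]
--
--         temp_count = 1
--
--         if e == "G":
--             for k in range(j+1, window_size):
--                 if seq[k] == "G":
--                     temp_count += 1
--                 else:
--                     j = k - 1
--                     break
--             else:
--                 j = window_size
--             temp += [min(temp_count,4) for i in range(temp_count)]
--
--
--         elif e == 'C':
--             for k in range(j+1, window_size):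
--                 if seq[k] == "C":
--                     temp_count += 1
--                 else:
--                     j = k - 1
--                     break
--             else:
--                 j = window_size
--
--             temp += [-min(temp_count,4) for i in range(temp_count)]
--         else:
--             temp += [0]
--         j+=1
--
--     return temp
-- ===== SOURCE B (Python) =====
-- def calculate_g4hunter_score(seq):
--     n = len(seq)
--     L = [0] * n
--     for i in range(n - 1, -1, -1):          # L[i] = length of the equal-char run extending right from i
--         L[i] = L[i + 1] + 1 if i + 1 < n and seq[i + 1] == seq[i] else 1
--     for i in range(1, n):                   # broadcast the full run length forward over each run
--         if seq[i] == seq[i - 1]: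
--             L[i] = L[i - 1]
--     res = []
--     for i in range(n):
--         v = min(L[i], 4)
--         res.append(v if seq[i] == 'G' else -v if seq[i] == 'C' else 0)
--     return res
-- ===== Notes on version B (the rewrite author's own statement) =====
-- stated objective: alternative
-- what changed: Replaces A's manual cursor loop with a nested forward scan per run by three flat linear passes: a backward DP computing the run length extending right of each position, a forward pass broadcasting the full run length over each run, and a scoring pass.
import Mathlib
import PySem

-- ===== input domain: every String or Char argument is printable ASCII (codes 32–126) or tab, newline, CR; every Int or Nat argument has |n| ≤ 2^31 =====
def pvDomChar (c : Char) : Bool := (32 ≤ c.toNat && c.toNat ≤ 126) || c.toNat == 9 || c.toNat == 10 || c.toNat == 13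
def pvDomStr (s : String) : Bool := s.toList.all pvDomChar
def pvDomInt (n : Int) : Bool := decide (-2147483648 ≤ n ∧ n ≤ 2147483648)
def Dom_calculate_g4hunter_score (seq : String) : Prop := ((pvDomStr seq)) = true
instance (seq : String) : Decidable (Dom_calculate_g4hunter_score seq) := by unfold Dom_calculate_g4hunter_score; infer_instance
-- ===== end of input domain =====

-- B replaces A's manual cursor/inner-scan run detection by three linear passes
-- (backward run DP, forward broadcast, scoring); objective: an alternative, flat-pass formulation of the same O(n) task.

-- ===== PORT A =====
-- inner `for k in range(j+1, ws)` loop of A: counts the run, returns (temp_count, new j)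
def pvInner (chars : List Char) (c : Char) (ws k tc : Nat) : Nat × Nat :=
  if k < ws then
    if chars.getD k ' ' = c then pvInner chars c ws (k + 1) (tc + 1)
    else (tc, k - 1)
  else (tc, ws)
termination_by ws - k


-- termination helper for pvALoop (cited by name in decreasing_by)
theorem pvInner_snd_ge (chars : List Char) (c : Char) (ws k tc : Nat) (h : k ≤ ws) :
    k ≤ (pvInner chars c ws k tc).2 + 1 := by
  unfold pvInner
  split
  · split
    · have := pvInner_snd_ge chars c ws (k + 1) (tc + 1) (by omega)
      omega
    · simp; omega
  · simp; omega
termination_by ws - k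

-- A's outer while loop over index j, building temp
def pvALoop (chars : List Char) (ws j : Nat) : List Int :=
  if h : j < ws then
    let e := chars.getD j ' '
    if e = 'G' then
      let p := pvInner chars 'G' ws (j + 1) 1
      List.replicate p.1 ((min p.1 4 : Nat) : Int) ++ pvALoop chars ws (p.2 + 1)
    else if e = 'C' then
      let p := pvInner chars 'C' ws (j + 1) 1
      List.replicate p.1 (-((min p.1 4 : Nat) : Int)) ++ pvALoop chars ws (p.2 + 1)
    else
      (0 : Int) :: pvALoop chars ws (j + 1)
  else []
termination_by ws - j
decreasing_by
  · have := pvInner_snd_ge chars 'G' ws (j+1) 1 (by omega); omega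
  · have := pvInner_snd_ge chars 'C' ws (j+1) 1 (by omega); omega
  · omega

def calculate_g4hunter_score (seq : String) : List Int :=
  pvALoop seq.toList seq.toList.length 0

-- ===== PORT B =====
-- first pass of Source B (backward): run length extending right from each position
def pvSuffRun : List Char → List Nat
  | [] => []
  | [_] => [1]
  | c :: c' :: cs =>
    match pvSuffRun (c' :: cs) with
    | r :: rs => (if c = c' then r + 1 else 1) :: r :: rs
    | [] => [1]

-- second pass of Source B (forward): carry the previous char and its (already final) run length
def pvPropAux (pc : Char) (pl : Nat) : List Char → List Nat → List Nat
  | c :: cs, l :: ls =>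
    let l' := if c = pc then pl else l
    l' :: pvPropAux c l' cs ls
  | _, _ => []

def pvProp : List Char → List Nat → List Nat
  | c :: cs, l :: ls => l :: pvPropAux c l cs ls
  | _, _ => []

-- third pass of Source B: score each position from its char and run length
def pvScore (c : Char) (n : Nat) : Int :=
  if c = 'G' then ((min n 4 : Nat) : Int) else if c = 'C' then -((min n 4 : Nat) : Int) else 0

def calculate_g4hunter_score_alt (seq : String) : List Int :=
  let chars := seq.toList
  List.zipWith pvScore chars (pvProp chars (pvSuffRun chars))

-- ===== PRECONDITION & SPEC =====
def Spec_calculate_g4hunter_score (seq : String) (out : List Int) : Prop := out = calculate_g4hunter_score_alt seq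
instance (seq : String) (out : List Int) : Decidable (Spec_calculate_g4hunter_score seq out) := by unfold Spec_calculate_g4hunter_score; infer_instance

-- ===== CLAIM (what is proved, stated in full; the proofs are below) =====
def Claim_equal_calculate_g4hunter_score : Prop := ∀ (seq : String), Dom_calculate_g4hunter_score seq → Spec_calculate_g4hunter_score seq (calculate_g4hunter_score seq)

-- ===== LEMMAS AND PROOFS =====

-- run-length prefix counter (proof-only)
def pvCW (c : Char) : List Char → Nat
  | [] => 0
  | d :: ds => if d = c then pvCW c ds + 1 else 0

theorem pvCW_le (c : Char) (cs : List Char) : pvCW c cs ≤ cs.length := by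
  induction cs with
  | nil => simp [pvCW]
  | cons d ds ih => simp [pvCW]; split <;> omega

theorem pvCW_take (c : Char) (cs : List Char) :
    cs.take (pvCW c cs) = List.replicate (pvCW c cs) c := by
  induction cs with
  | nil => simp [pvCW]
  | cons d ds ih =>
    simp only [pvCW]
    split
    · simp [List.replicate_succ, *]
    · simp

theorem pvCW_head_drop (c : Char) (cs : List Char) (d : Char)
    (h : cs[pvCW c cs]? = some d) : d ≠ c := by
  induction cs with
  | nil => simp at h
  | cons e es ih =>
    by_cases he : e = c
    · simp [pvCW, he] at h; exact ih h
    · simp [pvCW, he] at h; subst h; exact he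

-- canonical per-run form both ports are reduced to
def pvCanon : List Char → List Int
  | [] => []
  | c :: cs =>
    List.replicate (1 + pvCW c cs) (pvScore c (1 + pvCW c cs)) ++ pvCanon (cs.drop (pvCW c cs))
termination_by l => l.length
decreasing_by simp only [List.length_drop, List.length_cons]; have := pvCW_le c cs; omega

-- ===== A = canon =====
theorem pvInner_eq (chars : List Char) (c : Char) (k tc : Nat) (h : k ≤ chars.length) :
    pvInner chars c chars.length k tc =
      (tc + pvCW c (chars.drop k),
       if k + pvCW c (chars.drop k) = chars.length then chars.length
       else k + pvCW c (chars.drop k) - 1) := by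
  unfold pvInner
  split
  · rename_i hk
    have hd : chars.drop k = chars.getD k ' ' :: chars.drop (k + 1) := by
      rw [List.getD_eq_getElem chars ' ' hk]
      exact List.drop_eq_getElem_cons hk
    split
    · rename_i he
      rw [pvInner_eq chars c (k + 1) (tc + 1) (by omega)]
      rw [hd]
      simp only [pvCW, he, ite_true, Prod.mk.injEq]
      refine ⟨by omega, ?_⟩
      have hc : k + 1 + pvCW c (chars.drop (k + 1)) = k + (pvCW c (chars.drop (k + 1)) + 1) := by omega
      rw [hc]
    · rename_i he
      rw [hd]
      simp only [pvCW, if_neg he, Prod.mk.injEq]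
      refine ⟨by omega, ?_⟩
      rw [if_neg (by omega)]
      omega
  · rename_i hk
    have : k = chars.length := by omega
    subst this
    simp [pvCW]
termination_by chars.length - k

theorem pvCanon_cons_other (e : Char) (t : List Char) (hG : e ≠ 'G') (hC : e ≠ 'C') :
    pvCanon (e :: t) = 0 :: pvCanon t := by
  rw [pvCanon]
  have hsc : ∀ n, pvScore e n = 0 := by intro n; simp [pvScore, hG, hC]
  rcases hm : pvCW e t with _ | m
  · simp [hsc]
  · obtain ⟨t', rfl, ht'⟩ : ∃ t', t = e :: t' ∧ pvCW e t' = m := by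
      cases t with
      | nil => simp [pvCW] at hm
      | cons d ds =>
        by_cases hde : d = e
        · subst hde; refine ⟨ds, rfl, ?_⟩; simpa [pvCW] using hm
        · simp [pvCW, hde] at hm
    rw [
      show pvCanon (e :: t') = List.replicate (1 + m) (pvScore e (1 + m)) ++ pvCanon (t'.drop m) from
        by rw [pvCanon, ht']]
    simp only [hsc, List.drop_succ_cons]
    rw [show 1 + (m + 1) = (1 + m) + 1 from by omega]
    simp [List.replicate_succ]

theorem pvALoop_eq (chars : List Char) (j : Nat) :
    pvALoop chars chars.length j = pvCanon (chars.drop j) := by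
  unfold pvALoop
  split
  · rename_i hj
    have hd : chars.drop j = chars.getD j ' ' :: chars.drop (j + 1) := by
      rw [List.getD_eq_getElem chars ' ' hj]
      exact List.drop_eq_getElem_cons hj
    by_cases hG : chars.getD j ' ' = 'G'
    · rw [if_pos hG]
      rw [pvInner_eq chars 'G' (j + 1) 1 (by omega)]
      simp only []
      rw [pvALoop_eq chars ((if j + 1 + pvCW 'G' (chars.drop (j + 1)) = chars.length then chars.length
            else j + 1 + pvCW 'G' (chars.drop (j + 1)) - 1) + 1)]
      have hdrop : chars.drop ((if j + 1 + pvCW 'G' (chars.drop (j + 1)) = chars.length then chars.length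
            else j + 1 + pvCW 'G' (chars.drop (j + 1)) - 1) + 1) =
          chars.drop (j + 1 + pvCW 'G' (chars.drop (j + 1))) := by
        split
        · rename_i hlen
          rw [List.drop_eq_nil_of_le (by omega), hlen, List.drop_length]
        · rw [Nat.sub_add_cancel (by omega)]
      rw [hdrop, hd, pvCanon, hG]
      rw [List.drop_drop]
      simp [pvScore]
    · rw [if_neg hG]
      by_cases hC : chars.getD j ' ' = 'C'
      · rw [if_pos hC]
        rw [pvInner_eq chars 'C' (j + 1) 1 (by omega)]
        simp only []
        rw [pvALoop_eq chars ((if j + 1 + pvCW 'C' (chars.drop (j + 1)) = chars.length then chars.length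
              else j + 1 + pvCW 'C' (chars.drop (j + 1)) - 1) + 1)]
        have hdrop : chars.drop ((if j + 1 + pvCW 'C' (chars.drop (j + 1)) = chars.length then chars.length
              else j + 1 + pvCW 'C' (chars.drop (j + 1)) - 1) + 1) =
            chars.drop (j + 1 + pvCW 'C' (chars.drop (j + 1))) := by
          split
          · rename_i hlen
            rw [List.drop_eq_nil_of_le (by omega), hlen, List.drop_length]
          · rw [Nat.sub_add_cancel (by omega)]
        rw [hdrop, hd, pvCanon, hC]
        rw [List.drop_drop]
        simp [pvScore]
      · rw [if_neg hC]
        rw [pvALoop_eq chars (j + 1)]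
        rw [hd, pvCanon_cons_other _ _ hG hC]
  · rename_i hj
    rw [List.drop_eq_nil_of_le (by omega), pvCanon]
termination_by chars.length - j
decreasing_by
  · split <;> omega
  · split <;> omega
  · omega

-- ===== B = canon =====
def pvDsc : Nat → List Nat
  | 0 => []
  | n + 1 => (n + 1) :: pvDsc n

theorem pvDsc_length (n : Nat) : (pvDsc n).length = n := by
  induction n with
  | zero => rfl
  | succ n ih => simp [pvDsc, ih]

theorem pvSuffRun_length : (l : List Char) → (pvSuffRun l).length = l.length
  | [] => rfl
  | [_] => rfl
  | c :: c' :: cs => by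
    have ih := pvSuffRun_length (c' :: cs)
    rw [pvSuffRun]
    cases h : pvSuffRun (c' :: cs) with
    | nil => rw [h] at ih; simp at ih
    | cons r rs => rw [h] at ih; simp at ih ⊢; omega

theorem pvSuffRun_run (c : Char) (n : Nat) (rest : List Char)
    (h : ∀ d, rest.head? = some d → d ≠ c) :
    pvSuffRun (List.replicate n c ++ rest) = pvDsc n ++ pvSuffRun rest := by
  induction n with
  | zero => rfl
  | succ n ih =>
    cases n with
    | zero =>
      cases rest with
      | nil => simp [pvSuffRun, pvDsc]
      | cons d ds =>
        have hne : d ≠ c := h d rfl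
        have hlen := pvSuffRun_length (d :: ds)
        show pvSuffRun (c :: d :: ds) = pvDsc 1 ++ pvSuffRun (d :: ds)
        rw [pvSuffRun]
        cases h' : pvSuffRun (d :: ds) with
        | nil => rw [h'] at hlen; simp at hlen
        | cons r rs =>
          show (if c = d then r + 1 else 1) :: r :: rs = pvDsc 1 ++ r :: rs
          rw [if_neg (fun hcd => hne hcd.symm)]
          simp [pvDsc]
    | succ n =>
      have hsplit : List.replicate (n + 1 + 1) c ++ rest = c :: (List.replicate (n + 1) c ++ rest) := by
        simp [List.replicate_succ]
      rw [hsplit]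
      have hsplit2 : List.replicate (n + 1) c ++ rest = c :: (List.replicate n c ++ rest) := by
        simp [List.replicate_succ]
      rw [hsplit2] at ih ⊢
      rw [pvSuffRun, ih]
      simp [pvDsc]

theorem pvPropAux_run (c : Char) (v : Nat) (k : Nat) (rest : List Char) (ks ls : List Nat)
    (hk : ks.length = k) :
    pvPropAux c v (List.replicate k c ++ rest) (ks ++ ls) =
      List.replicate k v ++ pvPropAux c v rest ls := by
  induction ks generalizing k with
  | nil => subst hk; rfl
  | cons l ks ih =>
    subst hk
    simp only [List.length_cons, List.replicate_succ, List.cons_append, pvPropAux, ite_true]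
    rw [ih ks.length rfl]

theorem pvPropAux_to_prop (pc : Char) (pv : Nat) (rest : List Char)
    (h : ∀ d, rest.head? = some d → d ≠ pc) :
    pvPropAux pc pv rest (pvSuffRun rest) = pvProp rest (pvSuffRun rest) := by
  cases rest with
  | nil => rfl
  | cons d ds =>
    have hne : d ≠ pc := h d rfl
    have hlen := pvSuffRun_length (d :: ds)
    cases h' : pvSuffRun (d :: ds) with
    | nil => rw [h'] at hlen; simp at hlen
    | cons r rs =>
      simp only [pvPropAux, pvProp, if_neg hne]

theorem pvZipWith_replicate {α β γ : Type} (f : α → β → γ) (n : Nat) (a : α) (b : β) :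
    List.zipWith f (List.replicate n a) (List.replicate n b) = List.replicate n (f a b) := by
  induction n with
  | zero => rfl
  | succ n ih => simp [List.replicate_succ, ih]

theorem pvB_eq (chars : List Char) :
    List.zipWith pvScore chars (pvProp chars (pvSuffRun chars)) = pvCanon chars := by
  cases chars with
  | nil => simp [pvCanon]
  | cons c cs =>
    have hcs : cs = List.replicate (pvCW c cs) c ++ cs.drop (pvCW c cs) := by
      conv_lhs => rw [← List.take_append_drop (pvCW c cs) cs]
      rw [pvCW_take]
    have hrest : ∀ d, (cs.drop (pvCW c cs)).head? = some d → d ≠ c := by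
      intro d hd
      exact pvCW_head_drop c cs d (by rwa [← List.head?_drop])
    have hchars : c :: cs = List.replicate (pvCW c cs + 1) c ++ cs.drop (pvCW c cs) := by
      rw [List.replicate_succ, List.cons_append, ← hcs]
    rw [hchars, pvSuffRun_run c (pvCW c cs + 1) (cs.drop (pvCW c cs)) hrest]
    rw [show pvDsc (pvCW c cs + 1) = (pvCW c cs + 1) :: pvDsc (pvCW c cs) from rfl]
    rw [show List.replicate (pvCW c cs + 1) c = c :: List.replicate (pvCW c cs) c from List.replicate_succ ..]
    simp only [List.cons_append, pvProp]
    rw [pvPropAux_run c (pvCW c cs + 1) (pvCW c cs) (cs.drop (pvCW c cs)) (pvDsc (pvCW c cs)) _ (pvDsc_length _)]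
    rw [pvPropAux_to_prop c (pvCW c cs + 1) (cs.drop (pvCW c cs)) hrest]
    rw [show (pvCW c cs + 1) :: (List.replicate (pvCW c cs) (pvCW c cs + 1) ++ pvProp (cs.drop (pvCW c cs)) (pvSuffRun (cs.drop (pvCW c cs)))) = List.replicate (pvCW c cs + 1) (pvCW c cs + 1) ++ pvProp (cs.drop (pvCW c cs)) (pvSuffRun (cs.drop (pvCW c cs))) from by rw [List.replicate_succ, List.cons_append]]
    rw [show (c :: (List.replicate (pvCW c cs) c ++ List.drop (pvCW c cs) cs)) = List.replicate (pvCW c cs + 1) c ++ List.drop (pvCW c cs) cs from by rw [List.replicate_succ]; rfl]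
    rw [List.zipWith_append (by simp)]
    rw [pvZipWith_replicate, pvB_eq (cs.drop (pvCW c cs))]
    rw [← hchars, pvCanon]
    rw [show 1 + pvCW c cs = pvCW c cs + 1 from by omega]
termination_by chars.length
decreasing_by simp only [List.length_drop, List.length_cons]; have := pvCW_le c cs; omega


-- ===== VERDICT (by name: the statement is the Claim_ definition above) =====
theorem calculate_g4hunter_score_spec : Claim_equal_calculate_g4hunter_score := by
  intro seq _
  unfold Spec_calculate_g4hunter_score calculate_g4hunter_score calculate_g4hunter_score_alt
  rw [pvALoop_eq seq.toList 0, pvB_eq]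
  rfl
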